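-- pv_equiv track=rewrite | github.com/deecamp2019-group20/CNN_PokerNet | data/DataLoader.py | is_quadr2single
-- ===== SOURCE A (Python) =====
-- def is_quadr2single(card_list):
--     # index starts from 1
--     # NOTE: the 2 single here could also be one pair of Double (2 SAME single)
--     r""" Find whether this is a 4 cards main group with 2 singles in list of cards
--
--     Args:
--         card_list: a list of card
--
--     Return:
--         index: the index of the detected comb among quadr2single (start from 1)
--         Boolen: whether this card_list is a quadr2single
--     """
--     cards_rank_simple = [
--         '3', '4', '5', '6', '7', '8', '9', '10',
--         'J', 'Q', 'K', 'A', '2'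
--     ]
--     cards_rank_all = [
--         '3', '4', '5', '6', '7', '8', '9', '10',
--         'J', 'Q', 'K', 'A', '2', 'X', 'D'
--     ]
--
--     if len(card_list) != 6:
--         return -1, False
--     else:
--         if (
--             card_list[0] == card_list[1] == card_list[2] == card_list[3] and
--             card_list[4] != card_list[0] and
--                 card_list[5] != card_list[0]):
--             main_group_num = card_list[0]
--             # kicker_num_1 <= kicker_num_2
--             kicker_num_1 = card_list[5]
--             kicker_num_2 = card_list[4]
--             # calculate index
--             index = cards_rank_simple.index(main_group_num) * (91 + 12)
--             for i in range(0, cards_rank_simple.index(kicker_num_1)):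
--                 index += (14 - i)
--             index += (
--                 cards_rank_simple.index(kicker_num_2) -
--                 cards_rank_simple.index(kicker_num_1) + 1
--             )
--             return index, True
--
--         elif (
--             card_list[1] == card_list[2] == card_list[3] == card_list[4] and
--             card_list[0] != card_list[1] and
--                 card_list[5] != card_list[1]):
--             main_group_num = card_list[1]
--             kicker_num_1 = card_list[5]
--             kicker_num_2 = card_list[0]
--             # calculate index
--             index = cards_rank_simple.index(main_group_num) * (91 + 12)
--             for i in range(0, cards_rank_simple.index(kicker_num_1)):
--                 index += (14 - i)
--             index += (
--                 cards_rank_all.index(kicker_num_2) -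
--                 cards_rank_all.index(kicker_num_1)
--             )
--             return index, True
--
--         elif (
--             card_list[2] == card_list[3] == card_list[4] == card_list[5] and
--             card_list[0] != card_list[2] and
--                 card_list[1] != card_list[2]):
--             main_group_num = card_list[2]
--             kicker_num_1 = card_list[1]
--             kicker_num_2 = card_list[0]
--             # calculate index
--             index = cards_rank_simple.index(main_group_num) * (91 + 12)
--             for i in range(0, cards_rank_all.index(kicker_num_1)):
--                 if i < cards_rank_simple.index(main_group_num):
--                     index += (14 - i)
--                 elif i == cards_rank_simple.index(main_group_num):
--                     pass
--                 else:
--                     index += (15 - i)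
--             if kicker_num_1 == 'X':
--                 index += (
--                     cards_rank_all.index(kicker_num_2) -
--                     cards_rank_all.index(kicker_num_1)
--                 )
--             else:
--                 index += (
--                     cards_rank_all.index(kicker_num_2) -
--                     cards_rank_all.index(kicker_num_1) + 1
--                 )
--             return index, True
--         else:
--             return -1, False
-- ===== SOURCE B (Python) =====
-- def is_quadr2single(card_list):
--     # Single scan over the three possible quad start positions with one shared
--     # closed-form index formula (sum_{i<k}(14-i) = 14k - k(k-1)//2), instead of
--     # three separate branch bodies each with its own accumulation loop.
--     allr = ['3', '4', '5', '6', '7', '8', '9', '10',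
--             'J', 'Q', 'K', 'A', '2', 'X', 'D']
--     if len(card_list) != 6:
--         return -1, False
--     for s in (0, 1, 2):
--         main = card_list[s]
--         kickers = [c for j, c in enumerate(card_list) if j < s or s + 4 <= j]
--         if card_list[s:s + 4] == [main] * 4 and all(c != main for c in kickers):
--             m = allr.index(main)
--             k1 = allr.index(kickers[1])
--             k2 = allr.index(kickers[0])
--             base = 14 * k1 - k1 * (k1 - 1) // 2
--             if s == 2 and k1 > m:
--                 base += k1 - 15
--             bonus = 1 if s == 0 else (0 if s == 1 else (0 if kickers[1] == 'X' else 1))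
--             return m * 103 + base + k2 - k1 + bonus, True
--     return -1, False
-- ===== Notes on version B (the rewrite author's own statement) =====
-- stated objective: alternative
-- what changed: B replaces A's three copy-pasted branch bodies by a single scan over the three quad start positions, extracts the kickers by position, uses one rank table for all lookups, and computes the index with one shared closed-form formula (sum_{i<k}(14-i) = 14k - k(k-1)//2 plus a position-dependent correction) instead of A's per-branch accumulation loops.
import Mathlib
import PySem

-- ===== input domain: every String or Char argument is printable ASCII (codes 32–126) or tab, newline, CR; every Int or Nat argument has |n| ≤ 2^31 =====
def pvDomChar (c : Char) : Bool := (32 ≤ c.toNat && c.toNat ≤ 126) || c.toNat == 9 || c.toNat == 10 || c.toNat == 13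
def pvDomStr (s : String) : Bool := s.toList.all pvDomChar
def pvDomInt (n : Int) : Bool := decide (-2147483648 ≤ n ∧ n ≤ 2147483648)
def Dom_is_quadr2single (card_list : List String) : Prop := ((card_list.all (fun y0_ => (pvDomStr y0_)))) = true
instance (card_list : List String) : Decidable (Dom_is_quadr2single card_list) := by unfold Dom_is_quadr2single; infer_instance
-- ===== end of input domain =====

-- B folds A's three copy-pasted branches into one scan over the quad start positions
-- with a single closed-form index formula (objective: alternative).

-- the two rank tables of the Python module
def pvSimple : List String :=
  ["3", "4", "5", "6", "7", "8", "9", "10", "J", "Q", "K", "A", "2"]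
def pvAll : List String :=
  ["3", "4", "5", "6", "7", "8", "9", "10", "J", "Q", "K", "A", "2", "X", "D"]
-- card_list[i]: exact for 0 ≤ i < len (the only use, guarded by len = 6)
def pvC (cl : List String) (i : Int) : String := (PySem.List.pyGet? cl i).getD ""
-- list.index(v): Python raises ValueError when v ∉ list; those inputs are excluded by Pre_
def pvIdx (xs : List String) (v : String) : Nat := (PySem.List.index? xs v).getD 0

-- ===== PORT A =====
def is_quadr2single (card_list : List String) : Int × Bool :=
  if card_list.length ≠ 6 then (-1, false)
  else
    if pvC card_list 0 = pvC card_list 1 ∧ pvC card_list 1 = pvC card_list 2 ∧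
       pvC card_list 2 = pvC card_list 3 ∧ pvC card_list 4 ≠ pvC card_list 0 ∧
       pvC card_list 5 ≠ pvC card_list 0 then
      let m := pvIdx pvSimple (pvC card_list 0)
      let k1 := pvIdx pvSimple (pvC card_list 5)
      let k2 := pvIdx pvSimple (pvC card_list 4)
      let idx : Int :=
        (PySem.List.pyRange 0 (k1 : Int) 1).foldl (fun acc i => acc + (14 - i)) ((m : Int) * (91 + 12))
      (idx + ((k2 : Int) - (k1 : Int) + 1), true)
    else if pvC card_list 1 = pvC card_list 2 ∧ pvC card_list 2 = pvC card_list 3 ∧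
            pvC card_list 3 = pvC card_list 4 ∧ pvC card_list 0 ≠ pvC card_list 1 ∧
            pvC card_list 5 ≠ pvC card_list 1 then
      let m := pvIdx pvSimple (pvC card_list 1)
      let k1 := pvIdx pvSimple (pvC card_list 5)
      let k2 := pvIdx pvAll (pvC card_list 0)
      let k1a := pvIdx pvAll (pvC card_list 5)
      let idx : Int :=
        (PySem.List.pyRange 0 (k1 : Int) 1).foldl (fun acc i => acc + (14 - i)) ((m : Int) * (91 + 12))
      (idx + ((k2 : Int) - (k1a : Int)), true)
    else if pvC card_list 2 = pvC card_list 3 ∧ pvC card_list 3 = pvC card_list 4 ∧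
            pvC card_list 4 = pvC card_list 5 ∧ pvC card_list 0 ≠ pvC card_list 2 ∧
            pvC card_list 1 ≠ pvC card_list 2 then
      let m := pvIdx pvSimple (pvC card_list 2)
      let k1 := pvIdx pvAll (pvC card_list 1)
      let k2 := pvIdx pvAll (pvC card_list 0)
      let idx : Int :=
        (PySem.List.pyRange 0 (k1 : Int) 1).foldl
          (fun acc i =>
            if i < (m : Int) then acc + (14 - i)
            else if i = (m : Int) then acc
            else acc + (15 - i)) ((m : Int) * (91 + 12))
      if pvC card_list 1 = "X" then (idx + ((k2 : Int) - (k1 : Int)), true)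
      else (idx + ((k2 : Int) - (k1 : Int) + 1), true)
    else (-1, false)

-- ===== PORT B =====
-- B: one rank table for every lookup (allr.index); the defaulted getD 0 is never
-- reached inside Pre_ (Python would raise ValueError there)
def pvRank (v : String) : Nat := (PySem.List.index? pvAll v).getD 0
-- closed form: sum_{i<k}(14-i) = 14k - k(k-1)//2
def pvTri (k : Int) : Int := 14 * k - PySem.Int.floordiv (k * (k - 1)) 2

-- one iteration of B's for-loop: try quad start position s, None = no match
def pvBranch (cl : List String) (s : Nat) : Option (Int × Bool) :=
  let main := pvC cl (s : Int)
  let kickers := ((PySem.List.enumerate cl).filter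
      (fun p => decide (p.1 < (s : Int) ∨ (s : Int) + 4 ≤ p.1))).map (·.2)
  if PySem.List.slice cl (some (s : Int)) (some ((s : Int) + 4)) = List.replicate 4 main ∧
     (kickers.all (fun c => c != main)) = true then
    let m := pvRank main
    let k1 := pvRank (pvC kickers 1)
    let k2 := pvRank (pvC kickers 0)
    let base : Int := pvTri (k1 : Int)
    let base : Int := if s = 2 ∧ (k1 : Int) > (m : Int) then base + (k1 : Int) - 15 else base
    let bonus : Int :=
      if s = 0 then 1 else if s = 1 then 0 else if pvC kickers 1 = "X" then 0 else 1
    some ((m : Int) * 103 + base + (k2 : Int) - (k1 : Int) + bonus, true)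
  else none

def is_quadr2single_alt (card_list : List String) : Int × Bool :=
  if card_list.length ≠ 6 then (-1, false)
  else (([0, 1, 2] : List Nat).findSome? (pvBranch card_list)).getD (-1, false)

-- ===== PRECONDITION & SPEC =====
-- Pre_ excludes exactly the inputs where Python's list.index raises ValueError:
-- a quad branch fires but a card looked up is not in the rank table it is looked up in.
def Pre_is_quadr2single (card_list : List String) : Prop :=
  card_list.length ≠ 6 ∨
  ((¬(pvC card_list 0 = pvC card_list 1 ∧ pvC card_list 1 = pvC card_list 2 ∧
      pvC card_list 2 = pvC card_list 3 ∧ pvC card_list 4 ≠ pvC card_list 0 ∧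
      pvC card_list 5 ≠ pvC card_list 0) ∨
    (pvC card_list 0 ∈ pvSimple ∧ pvC card_list 5 ∈ pvSimple ∧ pvC card_list 4 ∈ pvSimple)) ∧
   (((pvC card_list 0 = pvC card_list 1 ∧ pvC card_list 1 = pvC card_list 2 ∧
      pvC card_list 2 = pvC card_list 3 ∧ pvC card_list 4 ≠ pvC card_list 0 ∧
      pvC card_list 5 ≠ pvC card_list 0) ∨
     ¬(pvC card_list 1 = pvC card_list 2 ∧ pvC card_list 2 = pvC card_list 3 ∧
       pvC card_list 3 = pvC card_list 4 ∧ pvC card_list 0 ≠ pvC card_list 1 ∧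
       pvC card_list 5 ≠ pvC card_list 1)) ∨
    (pvC card_list 1 ∈ pvSimple ∧ pvC card_list 5 ∈ pvSimple ∧ pvC card_list 0 ∈ pvAll)) ∧
   ((((pvC card_list 0 = pvC card_list 1 ∧ pvC card_list 1 = pvC card_list 2 ∧
       pvC card_list 2 = pvC card_list 3 ∧ pvC card_list 4 ≠ pvC card_list 0 ∧
       pvC card_list 5 ≠ pvC card_list 0) ∨
      (pvC card_list 1 = pvC card_list 2 ∧ pvC card_list 2 = pvC card_list 3 ∧
       pvC card_list 3 = pvC card_list 4 ∧ pvC card_list 0 ≠ pvC card_list 1 ∧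
       pvC card_list 5 ≠ pvC card_list 1)) ∨
     ¬(pvC card_list 2 = pvC card_list 3 ∧ pvC card_list 3 = pvC card_list 4 ∧
       pvC card_list 4 = pvC card_list 5 ∧ pvC card_list 0 ≠ pvC card_list 2 ∧
       pvC card_list 1 ≠ pvC card_list 2)) ∨
    (pvC card_list 2 ∈ pvSimple ∧ pvC card_list 1 ∈ pvAll ∧ pvC card_list 0 ∈ pvAll)))
set_option maxHeartbeats 1000000 in
instance (card_list : List String) : Decidable (Pre_is_quadr2single card_list) := by
  unfold Pre_is_quadr2single; infer_instance

def pvWitness_is_quadr2single : List String := ["3", "3", "3", "3", "5", "4"]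

def Spec_is_quadr2single (card_list : List String) (out : Int × Bool) : Prop := out = is_quadr2single_alt card_list
instance (card_list : List String) (out : Int × Bool) : Decidable (Spec_is_quadr2single card_list out) := by unfold Spec_is_quadr2single; infer_instance

-- ===== CLAIM (what is proved, stated in full; the proofs are below) =====
def Claim_equal_is_quadr2single : Prop := ∀ (card_list : List String), Dom_is_quadr2single card_list → Pre_is_quadr2single card_list → Spec_is_quadr2single card_list (is_quadr2single card_list)

-- ===== LEMMAS AND PROOFS =====

-- step identity of the closed form
theorem pvTri_succ (k : Int) : pvTri (k + 1) = pvTri k + (14 - k) := by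
  unfold pvTri
  rw [PySem.Int.floordiv_eq_ediv_of_pos (by norm_num : (0:Int) < 2),
      PySem.Int.floordiv_eq_ediv_of_pos (by norm_num : (0:Int) < 2)]
  have h : (k + 1) * (k + 1 - 1) = k * (k - 1) + k * 2 := by ring
  rw [h, Int.add_mul_ediv_right _ _ (by norm_num : (2:Int) ≠ 0)]
  ring

-- A's plain loop equals B's closed form pvTri
theorem pvSum14 (k : Nat) (a : Int) :
    (PySem.List.pyRange 0 (k : Int) 1).foldl (fun acc i => acc + (14 - i)) a
      = a + pvTri (k : Int) := by
  induction k with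
  | zero =>
    simp only [Nat.cast_zero]
    rw [PySem.List.pyRange_one_eq_nil le_rfl]
    have h0 : pvTri 0 = 0 := by decide
    simp [h0]
  | succ n ih =>
    have hr : PySem.List.pyRange 0 ((n + 1 : Nat) : Int) 1
        = PySem.List.pyRange 0 (n : Int) 1 ++ [(n : Int)] := by
      push_cast
      exact PySem.List.pyRange_one_succ_right (Int.natCast_nonneg n)
    rw [hr, List.foldl_append, ih]
    simp only [List.foldl_cons, List.foldl_nil]
    push_cast
    rw [pvTri_succ]
    ring

-- A's third-branch loop (skip i = m, use 15-i above m) equals B's corrected closed form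
theorem pvSum15 (k m : Nat) (a : Int) :
    (PySem.List.pyRange 0 (k : Int) 1).foldl
      (fun acc i =>
        if i < (m : Int) then acc + (14 - i)
        else if i = (m : Int) then acc
        else acc + (15 - i)) a
    = a + (if (k : Int) > (m : Int) then pvTri (k : Int) + (k : Int) - 15 else pvTri (k : Int)) := by
  induction k with
  | zero =>
    simp only [Nat.cast_zero]
    rw [PySem.List.pyRange_one_eq_nil le_rfl]
    have h0 : pvTri 0 = 0 := by decide
    have hng : ¬ ((0 : Int) > (m : Int)) := by omega
    simp [h0, hng]
  | succ n ih =>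
    have hr : PySem.List.pyRange 0 ((n + 1 : Nat) : Int) 1
        = PySem.List.pyRange 0 (n : Int) 1 ++ [(n : Int)] := by
      push_cast
      exact PySem.List.pyRange_one_succ_right (Int.natCast_nonneg n)
    rw [hr, List.foldl_append, ih]
    simp only [List.foldl_cons, List.foldl_nil]
    have hs := pvTri_succ (n : Int)
    push_cast
    split_ifs <;> omega

-- index in the full table = index in the simple table, for simple cards
theorem pvRank_eq_simple (v : String) (h : v ∈ pvSimple) : pvRank v = pvIdx pvSimple v := by
  have he : pvAll = pvSimple ++ ["X", "D"] := rfl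
  rw [pvRank, he, PySem.List.index?_append_of_mem _ h]
  rfl

set_option maxHeartbeats 2000000 in
theorem pvMain6 (a b c d e f : String) (pre : Pre_is_quadr2single [a, b, c, d, e, f]) :
    is_quadr2single [a, b, c, d, e, f] = is_quadr2single_alt [a, b, c, d, e, f] := by
  norm_num [Pre_is_quadr2single, pvC, PySem.List.pyGet?, PySem.List.pyIdx?,
    show Int.toNat 2 = 2 from rfl, show Int.toNat 3 = 3 from rfl,
    show Int.toNat 4 = 4 from rfl, show Int.toNat 5 = 5 from rfl,
    List.getElem_cons_zero, List.getElem_cons_succ,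
    show ∀ (x y : String) (l : List String), (x :: y :: l)[2]? = l[0]? from fun _ _ _ => rfl] at pre
  simp only [is_quadr2single, is_quadr2single_alt, pvBranch, List.findSome?]
  norm_num [pvC, PySem.List.pyGet?, PySem.List.pyIdx?, PySem.List.slice,
    PySem.List.clampIdx, PySem.List.enumerate, List.filter, List.replicate,
    List.getElem_cons_zero, List.getElem_cons_succ, List.take, List.drop,
    show Int.toNat 2 = 2 from rfl, show Int.toNat 3 = 3 from rfl,
    show Int.toNat 4 = 4 from rfl, show Int.toNat 5 = 5 from rfl,
    show Int.toNat 6 = 6 from rfl,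
    show ∀ (x y : String) (l : List String), (x :: y :: l)[2]? = l[0]? from fun _ _ _ => rfl]
  by_cases h1 : a = b ∧ b = c ∧ c = d ∧ ¬e = a ∧ ¬f = a
  · obtain ⟨h₁, h₂, h₃, h₄, h₅⟩ := h1
    subst h₁; subst h₂; subst h₃
    have hmem := pre.1.resolve_left (fun g => h₅ (g rfl rfl rfl h₄))
    rw [if_pos ⟨rfl, rfl, rfl, h₄, h₅⟩, if_pos ⟨⟨rfl, rfl, rfl⟩, h₄, h₅⟩, pvSum14,
        pvRank_eq_simple _ hmem.1, pvRank_eq_simple _ hmem.2.1, pvRank_eq_simple _ hmem.2.2]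
    simp only [Option.getD_some, Prod.mk.injEq, and_true]
    omega
  · have hB1 : ¬((b = a ∧ c = a ∧ d = a) ∧ ¬e = a ∧ ¬f = a) := fun hh =>
      h1 ⟨hh.1.1.symm, hh.1.1.trans hh.1.2.1.symm, hh.1.2.1.trans hh.1.2.2.symm, hh.2.1, hh.2.2⟩
    rw [if_neg h1, if_neg hB1]
    by_cases h2 : b = c ∧ c = d ∧ d = e ∧ ¬a = b ∧ ¬f = b
    · obtain ⟨h₁, h₂, h₃, h₄, h₅⟩ := h2
      subst h₁; subst h₂; subst h₃
      have hmem := pre.2.1.resolve_left (fun g =>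
        g.elim (fun gg => h₄ gg.1) (fun gg => h₅ (gg rfl rfl rfl h₄)))
      have hfa : pvIdx pvAll f = pvIdx pvSimple f := pvRank_eq_simple f hmem.2.1
      rw [if_pos ⟨rfl, rfl, rfl, h₄, h₅⟩, if_pos ⟨⟨rfl, rfl, rfl⟩, h₄, h₅⟩, pvSum14,
          pvRank_eq_simple _ hmem.1, pvRank_eq_simple _ hmem.2.1]
      simp only [Option.getD_some, Prod.mk.injEq, and_true, hfa,
        show ∀ v, pvRank v = pvIdx pvAll v from fun _ => rfl]
      omega
    · have hB2 : ¬((c = b ∧ d = b ∧ e = b) ∧ ¬a = b ∧ ¬f = b) := fun hh =>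
        h2 ⟨hh.1.1.symm, hh.1.1.trans hh.1.2.1.symm, hh.1.2.1.trans hh.1.2.2.symm, hh.2.1, hh.2.2⟩
      rw [if_neg h2, if_neg hB2]
      by_cases h3 : c = d ∧ d = e ∧ e = f ∧ ¬a = c ∧ ¬b = c
      · obtain ⟨h₁, h₂, h₃, h₄, h₅⟩ := h3
        subst h₁; subst h₂; subst h₃
        have hmem := pre.2.2.resolve_left (fun g =>
          g.elim (fun gl => gl.elim (fun gg => h₅ gg.2.1) (fun gg => h₅ gg.1))
            (fun gg => h₅ (gg rfl rfl rfl h₄)))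
        have hrc : pvRank c = pvIdx pvSimple c := pvRank_eq_simple c hmem.1
        have hA3 : c = c ∧ c = c ∧ c = c ∧ ¬a = c ∧ ¬b = c := ⟨rfl, rfl, rfl, h₄, h₅⟩
        have hB3 : (c = c ∧ c = c ∧ c = c) ∧ ¬a = c ∧ ¬b = c := ⟨⟨rfl, rfl, rfl⟩, h₄, h₅⟩
        rw [if_pos hA3, if_pos hB3]
        by_cases hx : b = "X"
        · rw [if_pos hx, pvSum15]
          simp only [Option.getD_some, Prod.mk.injEq, and_true, hrc,
            show ∀ v, pvRank v = pvIdx pvAll v from fun _ => rfl]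
          split_ifs <;> omega
        · rw [if_neg hx, pvSum15]
          simp only [Option.getD_some, Prod.mk.injEq, and_true, hrc,
            show ∀ v, pvRank v = pvIdx pvAll v from fun _ => rfl]
          split_ifs <;> omega
      · have hB3 : ¬((d = c ∧ e = c ∧ f = c) ∧ ¬a = c ∧ ¬b = c) := fun hh =>
          h3 ⟨hh.1.1.symm, hh.1.1.trans hh.1.2.1.symm, hh.1.2.1.trans hh.1.2.2.symm, hh.2.1, hh.2.2⟩
        rw [if_neg h3, if_neg hB3]
        rfl

-- ===== VERDICT (by name: the statement is the Claim_ definition above) =====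
theorem is_quadr2single_spec : Claim_equal_is_quadr2single := by
  unfold Claim_equal_is_quadr2single
  intro cl _dom pre
  unfold Spec_is_quadr2single
  match cl with
  | [a, b, c, d, e, f] => exact pvMain6 a b c d e f pre
  | [] | [_] | [_,_] | [_,_,_] | [_,_,_,_] | [_,_,_,_,_] => rfl
  | _ :: _ :: _ :: _ :: _ :: _ :: _ :: _ => rfl
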